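-- pv_equiv track=rewrite | github.com/BarciaSchool/docker-odoo-16 | addons/straconx_vat/objects/straconx_vat.py | check_vat_ec
-- ===== SOURCE A (Python) =====
-- def check_vat_ec(vat):
--     '''
--     Check Ecuadorian VAT number.
--     '''
--     b = False
--     checker = 999999
--
--     if len(vat) not in (10, 13):
--         return b
--     if not vat.isdigit():
--         return b
--     if vat == '9999999999999':
--         b = True
--     result = 0
--     residue = 0
--     # Natural Person CI
--     if len(vat) == 10:
--         value = [int(vat[x]) * (2 - x % 2) for x in range(9)]
--         total = sum(map(lambda x: x > 9 and x - 9 or x, value))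
--         if int(int(vat[9] if int(vat[9]) != 0 else 10)) == (10 - int(str(total)[-1:])):
--             b = True
--     elif len(vat) == 13:
--         # Public Companies vat
--         if int(vat[2]) == 6 and vat[12] == '1':
--             coefficient = "32765432"
--             checker = int(vat[8])
--             for i in range(8):
--                 result += (int(vat[i]) * int(coefficient[i]))
--                 residue = result % 11
--             if residue == 0:
--                 result = residue
--             else:
--                 result = 11 - residue
--         # Private Companies Vat
--         elif int(vat[2]) == 9 and vat[12] == '1':
--             coefficient = "432765432"
--             checker = int(vat[9])
--             for i in range(9):
--                 result += (int(vat[i]) * int(coefficient[i]))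
--                 residue = result % 11
--             if residue == 0:
--                 result = residue
--             else:
--                 result = 11 - residue
--         # Natural Person vat
--         elif int(vat[2]) < 6 and vat[12] == '1':
--             coefficient = "212121212"
--             checker = int(vat[9])
--             for i in range(9):
--                 sum_data = (int(vat[i]) * int(coefficient[i]))
--                 if sum_data > 9:
--                     str_sum = str(sum_data)
--                     sum_data = int(str_sum[0]) + int(str_sum[1])
--                 result += sum_data
--             residue = result % 10
--             if residue == 0:
--                 result = residue
--             else:
--                 result = 10 - residue
--         if result == checker:
--             b = True
--     return b
-- ===== SOURCE B (Python) =====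
-- def _divisible(digits, weights, mod, fold, acc):
--     # recursive augmented-sum test: valid iff (check + sum of weighted digits) % mod == 0
--     if not digits or not weights:
--         return acc % mod == 0
--     p = digits[0] * weights[0]
--     if fold and p > 9:
--         p -= 9
--     return _divisible(digits[1:], weights[1:], mod, fold, acc + p)
--
-- def check_vat_ec(vat):
--     '''
--     Check Ecuadorian VAT number.
--     '''
--     if len(vat) not in (10, 13) or not vat.isdigit():
--         return False
--     if vat == '9999999999999':
--         return True
--     rev = [int(ch) for ch in reversed(vat)]
--     if len(rev) == 10:
--         return _divisible(rev[1:], (2, 1, 2, 1, 2, 1, 2, 1, 2), 10, True, rev[0])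
--     if rev[0] != 1:
--         return False
--     t = rev[10]
--     if t == 6:
--         return _divisible(rev[5:], (2, 3, 4, 5, 6, 7, 2, 3), 11, False, rev[4])
--     if t == 9:
--         return _divisible(rev[4:], (2, 3, 4, 5, 6, 7, 2, 3, 4), 11, False, rev[3])
--     if t < 6:
--         return _divisible(rev[4:], (2, 1, 2, 1, 2, 1, 2, 1, 2), 10, True, rev[3])
--     return False
-- ===== Notes on version B (the rewrite author's own statement) =====
-- stated objective: alternative
-- what changed: B walks the digits right-to-left (reversed string, recursive accumulator, zipped reversed weight tuples) and accepts iff the check-digit-augmented weighted sum is divisible by the modulus, instead of A's three index loops that compute an expected check digit from the residue and compare it (including A's vat[9]-zero-to-ten substitution and str(total)[-1:] extraction, which B never performs).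
import Mathlib
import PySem

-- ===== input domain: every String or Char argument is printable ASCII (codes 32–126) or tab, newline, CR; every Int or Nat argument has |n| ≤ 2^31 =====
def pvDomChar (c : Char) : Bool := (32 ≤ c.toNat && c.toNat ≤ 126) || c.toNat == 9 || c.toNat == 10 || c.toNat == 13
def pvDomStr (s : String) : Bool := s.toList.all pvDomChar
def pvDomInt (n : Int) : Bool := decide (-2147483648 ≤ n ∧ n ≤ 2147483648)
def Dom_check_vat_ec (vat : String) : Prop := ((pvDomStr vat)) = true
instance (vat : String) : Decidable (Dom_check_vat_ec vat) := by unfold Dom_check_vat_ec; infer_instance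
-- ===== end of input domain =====

-- B validates right-to-left by a divisibility test of the check-digit-augmented weighted sum
-- (recursive, early returns) instead of A's three index loops that compute an expected check
-- digit from the residue (objective: alternative); return values are identical on Dom.

-- ===== PORT A =====
-- int(s[i]) as A performs it; the .getD 0 is unreachable: A only indexes in range on digit strings
def pvIntAt (s : List Char) (i : Int) : Int :=
  ((PySem.List.pyGet? s i).bind (fun c => PySem.Int.ofChars? [c])).getD 0

def check_vat_ec (vat : String) : Bool :=
  let l := vat.toList
  let b := false
  let checker : Int := 999999
  if ¬ (l.length = 10 ∨ l.length = 13) then b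
  else if ¬ PySem.Chars.strIsdigit l then b
  else
    let b := if l = "9999999999999".toList then true else b
    if l.length = 10 then
      let value := (PySem.List.pyRange 0 9).map (fun x => pvIntAt l x * (2 - PySem.Int.mod x 2))
      let total := (value.map (fun x => if 9 < x then x - 9 else x)).sum
      if (if pvIntAt l 9 ≠ 0 then pvIntAt l 9 else 10) =
          10 - (PySem.Int.ofChars? (PySem.List.slice (PySem.Int.toChars total) (some (-1)) none)).getD 0
      then true else b
    else if l.length = 13 then
      -- (result, checker) as left by A's three elif branches (default: result 0, checker 999999)
      let rc : Int × Int :=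
        if pvIntAt l 2 = 6 ∧ PySem.List.pyGet? l 12 = some '1' then
          let coefficient := "32765432".toList
          let checker := pvIntAt l 8
          let rr := (PySem.List.pyRange 0 8).foldl (fun (st : Int × Int) i =>
            let result := st.1 + pvIntAt l i * pvIntAt coefficient i
            (result, PySem.Int.mod result 11)) (0, 0)
          let result := if rr.2 = 0 then rr.2 else 11 - rr.2
          (result, checker)
        else if pvIntAt l 2 = 9 ∧ PySem.List.pyGet? l 12 = some '1' then
          let coefficient := "432765432".toList
          let checker := pvIntAt l 9
          let rr := (PySem.List.pyRange 0 9).foldl (fun (st : Int × Int) i =>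
            let result := st.1 + pvIntAt l i * pvIntAt coefficient i
            (result, PySem.Int.mod result 11)) (0, 0)
          let result := if rr.2 = 0 then rr.2 else 11 - rr.2
          (result, checker)
        else if pvIntAt l 2 < 6 ∧ PySem.List.pyGet? l 12 = some '1' then
          let coefficient := "212121212".toList
          let checker := pvIntAt l 9
          let result := (PySem.List.pyRange 0 9).foldl (fun (result : Int) i =>
            let sum_data := pvIntAt l i * pvIntAt coefficient i
            let sum_data :=
              if 9 < sum_data then
                let str_sum := PySem.Int.toChars sum_data
                pvIntAt str_sum 0 + pvIntAt str_sum 1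
              else sum_data
            result + sum_data) 0
          let residue := PySem.Int.mod result 10
          let result := if residue = 0 then residue else 10 - residue
          (result, checker)
        else (0, checker)
      if rc.1 = rc.2 then true else b
    else b

-- ===== PORT B =====
-- int(ch) for a digit character (B only applies it to chars of a string that passed isdigit)
def pvCharInt (c : Char) : Int := (PySem.Int.ofChars? [c]).getD 0

-- B's recursive _divisible: (acc + Σ weighted digits) % mod == 0, folding two-digit products when asked
def pvDivisible : List Int → List Int → Int → Bool → Int → Bool
  | [], _, m, _, acc => PySem.Int.mod acc m == 0
  | _ :: _, [], m, _, acc => PySem.Int.mod acc m == 0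
  | d :: ds, w :: ws, m, fold, acc =>
      let p := d * w
      let p := if fold = true ∧ 9 < p then p - 9 else p
      pvDivisible ds ws m fold (acc + p)

def check_vat_ec_alt (vat : String) : Bool :=
  let l := vat.toList
  if ¬ (l.length = 10 ∨ l.length = 13) ∨ ¬ PySem.Chars.strIsdigit l then false
  else if l = "9999999999999".toList then true
  else
    let rev := l.reverse.map pvCharInt
    if rev.length = 10 then
      pvDivisible (PySem.List.slice rev (some 1) none) [2,1,2,1,2,1,2,1,2] 10 true
        ((PySem.List.pyGet? rev 0).getD 0)
    else if ¬ ((PySem.List.pyGet? rev 0).getD 0 = 1) then false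
    else
      let t := (PySem.List.pyGet? rev 10).getD 0
      if t = 6 then
        pvDivisible (PySem.List.slice rev (some 5) none) [2,3,4,5,6,7,2,3] 11 false
          ((PySem.List.pyGet? rev 4).getD 0)
      else if t = 9 then
        pvDivisible (PySem.List.slice rev (some 4) none) [2,3,4,5,6,7,2,3,4] 11 false
          ((PySem.List.pyGet? rev 3).getD 0)
      else if t < 6 then
        pvDivisible (PySem.List.slice rev (some 4) none) [2,1,2,1,2,1,2,1,2] 10 true
          ((PySem.List.pyGet? rev 3).getD 0)
      else false

-- ===== PRECONDITION & SPEC =====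
def Spec_check_vat_ec (vat : String) (out : Bool) : Prop := out = check_vat_ec_alt vat
instance (vat : String) (out : Bool) : Decidable (Spec_check_vat_ec vat out) := by unfold Spec_check_vat_ec; infer_instance

-- ===== CLAIM (what is proved, stated in full; the proofs are below) =====
def Claim_equal_check_vat_ec : Prop := ∀ (vat : String), Dom_check_vat_ec vat → Spec_check_vat_ec vat (check_vat_ec vat)

-- ===== LEMMAS AND PROOFS =====

theorem pv_slice1_10 {A : Type} (x0 x1 x2 x3 x4 x5 x6 x7 x8 x9 : A) :
    PySem.List.slice [x0,x1,x2,x3,x4,x5,x6,x7,x8,x9] (some 1) none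
      = [x1,x2,x3,x4,x5,x6,x7,x8,x9] := by
  simp [PySem.List.slice]

theorem pv_slice4_13 {A : Type} (x0 x1 x2 x3 x4 x5 x6 x7 x8 x9 x10 x11 x12 : A) :
    PySem.List.slice [x0,x1,x2,x3,x4,x5,x6,x7,x8,x9,x10,x11,x12] (some 4) none
      = [x4,x5,x6,x7,x8,x9,x10,x11,x12] := by
  simp [PySem.List.slice]

theorem pv_slice5_13 {A : Type} (x0 x1 x2 x3 x4 x5 x6 x7 x8 x9 x10 x11 x12 : A) :
    PySem.List.slice [x0,x1,x2,x3,x4,x5,x6,x7,x8,x9,x10,x11,x12] (some 5) none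
      = [x5,x6,x7,x8,x9,x10,x11,x12] := by
  simp [PySem.List.slice]

theorem pv_digit_cases (c : Char) (h : PySem.Chars.isdigit c = true) :
    c = '0' ∨ c = '1' ∨ c = '2' ∨ c = '3' ∨ c = '4' ∨ c = '5' ∨ c = '6' ∨ c = '7' ∨ c = '8' ∨ c = '9' := by
  simp only [PySem.Chars.isdigit, Bool.and_eq_true, decide_eq_true_eq, Char.le_def] at h
  obtain ⟨h0, h9⟩ := h
  have h0' : 48 ≤ c.val.toNat := h0
  have h9' : c.val.toNat ≤ 57 := h9
  have hval : ∀ (d : Char), c.val.toNat = d.val.toNat → c = d := fun d hd =>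
    Char.ext (UInt32.toNat_inj.mp hd)
  obtain ⟨n, hn⟩ : ∃ n, c.val.toNat = n := ⟨_, rfl⟩
  rw [hn] at h0' h9'
  interval_cases n
  · exact .inl (hval '0' (by rw [hn]; rfl))
  · exact .inr (.inl (hval '1' (by rw [hn]; rfl)))
  · exact .inr (.inr (.inl (hval '2' (by rw [hn]; rfl))))
  · exact .inr (.inr (.inr (.inl (hval '3' (by rw [hn]; rfl)))))
  · exact .inr (.inr (.inr (.inr (.inl (hval '4' (by rw [hn]; rfl))))))
  · exact .inr (.inr (.inr (.inr (.inr (.inl (hval '5' (by rw [hn]; rfl)))))))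
  · exact .inr (.inr (.inr (.inr (.inr (.inr (.inl (hval '6' (by rw [hn]; rfl))))))))
  · exact .inr (.inr (.inr (.inr (.inr (.inr (.inr (.inl (hval '7' (by rw [hn]; rfl)))))))))
  · exact .inr (.inr (.inr (.inr (.inr (.inr (.inr (.inr (.inl (hval '8' (by rw [hn]; rfl))))))))))
  · exact .inr (.inr (.inr (.inr (.inr (.inr (.inr (.inr (.inr (hval '9' (by rw [hn]; rfl))))))))))

theorem pv_charInt_bounds (c : Char) (h : PySem.Chars.isdigit c = true) :
    0 ≤ pvCharInt c ∧ pvCharInt c ≤ 9 := by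
  rcases pv_digit_cases c h with rfl|rfl|rfl|rfl|rfl|rfl|rfl|rfl|rfl|rfl <;> exact ⟨by decide, by decide⟩

-- str(total)[-1:] read back as an int is total % 10, for the bounded totals A produces
theorem pv_lastDigit (t : Int) (h0 : 0 ≤ t) (h1 : t ≤ 81) :
    (PySem.Int.ofChars? (PySem.List.slice (PySem.Int.toChars t) (some (-1)) none)).getD 0
      = PySem.Int.mod t 10 := by
  have key : ∀ n : Fin 82,
      (PySem.Int.ofChars? (PySem.List.slice (PySem.Int.toChars ((n : Nat) : Int)) (some (-1)) none)).getD 0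
        = PySem.Int.mod ((n : Nat) : Int) 10 := by decide
  have ht : t = ((t.toNat : Nat) : Int) := (Int.toNat_of_nonneg h0).symm
  have hlt : t.toNat < 82 := by omega
  rw [ht]
  exact key ⟨t.toNat, hlt⟩

set_option maxHeartbeats 2000000 in
theorem pv_case10 (vat : String) (a0 a1 a2 a3 a4 a5 a6 a7 a8 a9 : Char)
    (hv : vat.toList = [a0,a1,a2,a3,a4,a5,a6,a7,a8,a9])
    (h : PySem.Chars.strIsdigit [a0,a1,a2,a3,a4,a5,a6,a7,a8,a9] = true) :
    check_vat_ec vat = check_vat_ec_alt vat := by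
  have hS : "9999999999999".toList = ['9','9','9','9','9','9','9','9','9','9','9','9','9'] := by decide
  have hdig := h
  simp only [PySem.Chars.strIsdigit, List.isEmpty_cons, List.all_cons, List.all_nil,
    Bool.not_false, Bool.true_and, Bool.and_true, Bool.and_eq_true] at h
  obtain ⟨h0,h1,h2,h3,h4,h5,h6,h7,h8,h9⟩ := h
  have hr9 : PySem.List.pyRange 0 9 = [0,1,2,3,4,5,6,7,8] := by decide
  simp only [check_vat_ec, check_vat_ec_alt, hv, hr9, hS, List.length_cons, List.length_nil]
  simp [hdig, PySem.List.pyGet?, PySem.List.pyIdx?, pv_slice1_10, pvIntAt, pvCharInt,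
    pvDivisible]
  have b0 := pv_charInt_bounds a0 h0; have b1 := pv_charInt_bounds a1 h1
  have b2 := pv_charInt_bounds a2 h2; have b3 := pv_charInt_bounds a3 h3
  have b4 := pv_charInt_bounds a4 h4; have b5 := pv_charInt_bounds a5 h5
  have b6 := pv_charInt_bounds a6 h6; have b7 := pv_charInt_bounds a7 h7
  have b8 := pv_charInt_bounds a8 h8; have b9 := pv_charInt_bounds a9 h9
  simp only [pvCharInt] at b0 b1 b2 b3 b4 b5 b6 b7 b8 b9
  generalize hd0 : (PySem.Int.ofChars? [a0]).getD 0 = d0 at *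
  generalize hd1 : (PySem.Int.ofChars? [a1]).getD 0 = d1 at *
  generalize hd2 : (PySem.Int.ofChars? [a2]).getD 0 = d2 at *
  generalize hd3 : (PySem.Int.ofChars? [a3]).getD 0 = d3 at *
  generalize hd4 : (PySem.Int.ofChars? [a4]).getD 0 = d4 at *
  generalize hd5 : (PySem.Int.ofChars? [a5]).getD 0 = d5 at *
  generalize hd6 : (PySem.Int.ofChars? [a6]).getD 0 = d6 at *
  generalize hd7 : (PySem.Int.ofChars? [a7]).getD 0 = d7 at *
  generalize hd8 : (PySem.Int.ofChars? [a8]).getD 0 = d8 at *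
  generalize hd9 : (PySem.Int.ofChars? [a9]).getD 0 = d9 at *
  have f0 : 0 ≤ (if 9 < d0 * 2 then d0 * 2 - 9 else d0 * 2) ∧ (if 9 < d0 * 2 then d0 * 2 - 9 else d0 * 2) ≤ 9 := by split_ifs <;> omega
  have f1 : 0 ≤ (if 9 < d1 then d1 - 9 else d1) ∧ (if 9 < d1 then d1 - 9 else d1) ≤ 9 := by split_ifs <;> omega
  have f2 : 0 ≤ (if 9 < d2 * 2 then d2 * 2 - 9 else d2 * 2) ∧ (if 9 < d2 * 2 then d2 * 2 - 9 else d2 * 2) ≤ 9 := by split_ifs <;> omega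
  have f3 : 0 ≤ (if 9 < d3 then d3 - 9 else d3) ∧ (if 9 < d3 then d3 - 9 else d3) ≤ 9 := by split_ifs <;> omega
  have f4 : 0 ≤ (if 9 < d4 * 2 then d4 * 2 - 9 else d4 * 2) ∧ (if 9 < d4 * 2 then d4 * 2 - 9 else d4 * 2) ≤ 9 := by split_ifs <;> omega
  have f5 : 0 ≤ (if 9 < d5 then d5 - 9 else d5) ∧ (if 9 < d5 then d5 - 9 else d5) ≤ 9 := by split_ifs <;> omega
  have f6 : 0 ≤ (if 9 < d6 * 2 then d6 * 2 - 9 else d6 * 2) ∧ (if 9 < d6 * 2 then d6 * 2 - 9 else d6 * 2) ≤ 9 := by split_ifs <;> omega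
  have f7 : 0 ≤ (if 9 < d7 then d7 - 9 else d7) ∧ (if 9 < d7 then d7 - 9 else d7) ≤ 9 := by split_ifs <;> omega
  have f8 : 0 ≤ (if 9 < d8 * 2 then d8 * 2 - 9 else d8 * 2) ∧ (if 9 < d8 * 2 then d8 * 2 - 9 else d8 * 2) ≤ 9 := by split_ifs <;> omega
  generalize hE0 : (if 9 < d0 * 2 then d0 * 2 - 9 else d0 * 2) = e0 at f0 ⊢
  generalize hE1 : (if 9 < d1 then d1 - 9 else d1) = e1 at f1 ⊢
  generalize hE2 : (if 9 < d2 * 2 then d2 * 2 - 9 else d2 * 2) = e2 at f2 ⊢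
  generalize hE3 : (if 9 < d3 then d3 - 9 else d3) = e3 at f3 ⊢
  generalize hE4 : (if 9 < d4 * 2 then d4 * 2 - 9 else d4 * 2) = e4 at f4 ⊢
  generalize hE5 : (if 9 < d5 then d5 - 9 else d5) = e5 at f5 ⊢
  generalize hE6 : (if 9 < d6 * 2 then d6 * 2 - 9 else d6 * 2) = e6 at f6 ⊢
  generalize hE7 : (if 9 < d7 then d7 - 9 else d7) = e7 at f7 ⊢
  generalize hE8 : (if 9 < d8 * 2 then d8 * 2 - 9 else d8 * 2) = e8 at f8 ⊢
  rw [pv_lastDigit _ (by omega) (by omega),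
    PySem.Int.mod_eq_emod_of_pos (show (0:Int) < 10 by norm_num), Bool.eq_iff_iff]
  simp only [decide_eq_true_eq, beq_iff_eq]
  split_ifs <;> omega

set_option maxHeartbeats 4000000 in
theorem pv_case13 (vat : String) (a0 a1 a2 a3 a4 a5 a6 a7 a8 a9 a10 a11 a12 : Char)
    (hv : vat.toList = [a0,a1,a2,a3,a4,a5,a6,a7,a8,a9,a10,a11,a12])
    (h : PySem.Chars.strIsdigit [a0,a1,a2,a3,a4,a5,a6,a7,a8,a9,a10,a11,a12] = true)
    (h99 : vat.toList ≠ "9999999999999".toList) :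
    check_vat_ec vat = check_vat_ec_alt vat := by
  have hdig := h
  rw [hv] at h99
  have h99' : ([a0,a1,a2,a3,a4,a5,a6,a7,a8,a9,a10,a11,a12] = "9999999999999".toList) = False :=
    eq_false h99
  simp only [PySem.Chars.strIsdigit, List.isEmpty_cons, List.all_cons, List.all_nil,
    Bool.not_false, Bool.true_and, Bool.and_true, Bool.and_eq_true] at h
  obtain ⟨h0,h1,h2,h3,h4,h5,h6,h7,h8,h9,h10,h11,h12⟩ := h
  have hr8 : PySem.List.pyRange 0 8 = [0,1,2,3,4,5,6,7] := by decide
  have hr9 : PySem.List.pyRange 0 9 = [0,1,2,3,4,5,6,7,8] := by decide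
  have c1 : (PySem.Int.ofChars? ['1']).getD 0 = 1 := by decide
  have c2 : (PySem.Int.ofChars? ['2']).getD 0 = 2 := by decide
  have c3 : (PySem.Int.ofChars? ['3']).getD 0 = 3 := by decide
  have c4 : (PySem.Int.ofChars? ['4']).getD 0 = 4 := by decide
  have c5 : (PySem.Int.ofChars? ['5']).getD 0 = 5 := by decide
  have c6 : (PySem.Int.ofChars? ['6']).getD 0 = 6 := by decide
  have c7 : (PySem.Int.ofChars? ['7']).getD 0 = 7 := by decide
  have b0 := pv_charInt_bounds a0 h0; have b1 := pv_charInt_bounds a1 h1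
  have b2 := pv_charInt_bounds a2 h2; have b3 := pv_charInt_bounds a3 h3
  have b4 := pv_charInt_bounds a4 h4; have b5 := pv_charInt_bounds a5 h5
  have b6 := pv_charInt_bounds a6 h6; have b7 := pv_charInt_bounds a7 h7
  have b8 := pv_charInt_bounds a8 h8; have b9 := pv_charInt_bounds a9 h9
  simp only [pvCharInt] at b0 b1 b2 b3 b4 b5 b6 b7 b8 b9
  by_cases ha12 : a12 = '1'
  case neg =>
    have hne : (PySem.Int.ofChars? [a12]).getD 0 ≠ 1 := by
      rcases pv_digit_cases a12 h12 with rfl|rfl|rfl|rfl|rfl|rfl|rfl|rfl|rfl|rfl <;>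
        first | (exact absurd rfl ha12) | decide
    simp [check_vat_ec, check_vat_ec_alt, hv, hdig, ha12,
      PySem.List.pyGet?, PySem.List.pyIdx?, pvIntAt, pvCharInt]
    intro hx
    exact absurd hx hne
  subst ha12
  simp [check_vat_ec, check_vat_ec_alt, hv, hr8, hr9, hdig,
    PySem.List.pyGet?, PySem.List.pyIdx?, pv_slice4_13, pv_slice5_13, pvIntAt, pvCharInt,
    pvDivisible, c1, c2, c3, c4, c5, c6, c7]
  generalize hd0 : (PySem.Int.ofChars? [a0]).getD 0 = d0 at *
  generalize hd1 : (PySem.Int.ofChars? [a1]).getD 0 = d1 at *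
  generalize hd2 : (PySem.Int.ofChars? [a2]).getD 0 = d2 at *
  generalize hd3 : (PySem.Int.ofChars? [a3]).getD 0 = d3 at *
  generalize hd4 : (PySem.Int.ofChars? [a4]).getD 0 = d4 at *
  generalize hd5 : (PySem.Int.ofChars? [a5]).getD 0 = d5 at *
  generalize hd6 : (PySem.Int.ofChars? [a6]).getD 0 = d6 at *
  generalize hd7 : (PySem.Int.ofChars? [a7]).getD 0 = d7 at *
  generalize hd8 : (PySem.Int.ofChars? [a8]).getD 0 = d8 at *
  generalize hd9 : (PySem.Int.ofChars? [a9]).getD 0 = d9 at *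
  by_cases h6c : d2 = 6
  · subst h6c
    norm_num
    rw [Bool.eq_iff_iff]
    simp only [decide_eq_true_eq, beq_iff_eq]
    split_ifs <;> omega
  by_cases h9c : d2 = 9
  · subst h9c
    norm_num
    rw [Bool.eq_iff_iff]
    simp only [decide_eq_true_eq, beq_iff_eq]
    split_ifs <;> omega
  by_cases hlt : d2 < 6
  · have FS : ∀ q : Fin 9,
        ((((if (0:Nat) < (PySem.Int.toChars ((q:Nat) + 10 : Int)).length then some (0:Nat) else none).bind
              fun a => (PySem.Int.toChars ((q:Nat) + 10 : Int))[a]?).bind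
            fun a => PySem.Int.ofChars? [a]).getD 0 : Int) +
          ((((if (1:Nat) < (PySem.Int.toChars ((q:Nat) + 10 : Int)).length then some (1:Nat) else none).bind
              fun a => (PySem.Int.toChars ((q:Nat) + 10 : Int))[a]?).bind
            fun a => PySem.Int.ofChars? [a]).getD 0) = ((q:Nat) + 10 : Int) - 9 := by decide
    have FS' : ∀ p : Int, 9 < p → p ≤ 18 →
        ((((if (0:Nat) < (PySem.Int.toChars p).length then some (0:Nat) else none).bind
              fun a => (PySem.Int.toChars p)[a]?).bind
            fun a => PySem.Int.ofChars? [a]).getD 0 : Int) +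
          ((((if (1:Nat) < (PySem.Int.toChars p).length then some (1:Nat) else none).bind
              fun a => (PySem.Int.toChars p)[a]?).bind
            fun a => PySem.Int.ofChars? [a]).getD 0) = p - 9 := by
      intro p hp hp'
      have hq : p = ((p.toNat - 10 : Nat) : Int) + 10 := by omega
      rw [hq]
      exact FS ⟨p.toNat - 10, by omega⟩
    have G2 : ∀ p : Int, 0 ≤ p → p ≤ 9 →
        (if 9 < p * 2 then
          ((((if (0:Nat) < (PySem.Int.toChars (p * 2)).length then some (0:Nat) else none).bind
                fun a => (PySem.Int.toChars (p * 2))[a]?).bind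
              fun a => PySem.Int.ofChars? [a]).getD 0 : Int) +
            ((((if (1:Nat) < (PySem.Int.toChars (p * 2)).length then some (1:Nat) else none).bind
                fun a => (PySem.Int.toChars (p * 2))[a]?).bind
              fun a => PySem.Int.ofChars? [a]).getD 0)
        else p * 2) = if 9 < p * 2 then p * 2 - 9 else p * 2 := by
      intro p h0 h9'
      by_cases h : 9 < p * 2
      · rw [if_pos h, if_pos h, FS' _ h (by omega)]
      · rw [if_neg h, if_neg h]
    have G1 : ∀ p : Int, 0 ≤ p → p ≤ 9 →
        (if 9 < p then
          ((((if (0:Nat) < (PySem.Int.toChars p).length then some (0:Nat) else none).bind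
                fun a => (PySem.Int.toChars p)[a]?).bind
              fun a => PySem.Int.ofChars? [a]).getD 0 : Int) +
            ((((if (1:Nat) < (PySem.Int.toChars p).length then some (1:Nat) else none).bind
                fun a => (PySem.Int.toChars p)[a]?).bind
              fun a => PySem.Int.ofChars? [a]).getD 0)
        else p) = p := by
      intro p h0 h9'
      rw [if_neg (by omega)]
    simp [h6c, h9c, hlt]
    rw [G2 d0 b0.1 b0.2, G2 d2 b2.1 b2.2, G2 d4 b4.1 b4.2, G2 d6 b6.1 b6.2, G2 d8 b8.1 b8.2,
      G1 d1 b1.1 b1.2, G1 d3 b3.1 b3.2, G1 d5 b5.1 b5.2, G1 d7 b7.1 b7.2]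
    have f0 : 0 ≤ (if 9 < d0 * 2 then d0 * 2 - 9 else d0 * 2) ∧ (if 9 < d0 * 2 then d0 * 2 - 9 else d0 * 2) ≤ 9 := by split_ifs <;> omega
    have f2 : 0 ≤ (if 9 < d2 * 2 then d2 * 2 - 9 else d2 * 2) ∧ (if 9 < d2 * 2 then d2 * 2 - 9 else d2 * 2) ≤ 9 := by split_ifs <;> omega
    have f4 : 0 ≤ (if 9 < d4 * 2 then d4 * 2 - 9 else d4 * 2) ∧ (if 9 < d4 * 2 then d4 * 2 - 9 else d4 * 2) ≤ 9 := by split_ifs <;> omega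
    have f6 : 0 ≤ (if 9 < d6 * 2 then d6 * 2 - 9 else d6 * 2) ∧ (if 9 < d6 * 2 then d6 * 2 - 9 else d6 * 2) ≤ 9 := by split_ifs <;> omega
    have f8 : 0 ≤ (if 9 < d8 * 2 then d8 * 2 - 9 else d8 * 2) ∧ (if 9 < d8 * 2 then d8 * 2 - 9 else d8 * 2) ≤ 9 := by split_ifs <;> omega
    generalize (if 9 < d0 * 2 then d0 * 2 - 9 else d0 * 2 : Int) = e0 at f0 ⊢
    generalize (if 9 < d2 * 2 then d2 * 2 - 9 else d2 * 2 : Int) = e2 at f2 ⊢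
    generalize (if 9 < d4 * 2 then d4 * 2 - 9 else d4 * 2 : Int) = e4 at f4 ⊢
    generalize (if 9 < d6 * 2 then d6 * 2 - 9 else d6 * 2 : Int) = e6 at f6 ⊢
    generalize (if 9 < d8 * 2 then d8 * 2 - 9 else d8 * 2 : Int) = e8 at f8 ⊢
    rw [Bool.eq_iff_iff]
    simp only [decide_eq_true_eq, beq_iff_eq]
    split_ifs <;> omega
  · -- d2 = 7 or 8: A matches no branch, B falls through to its final False
    simp [h6c, h9c, hlt]

theorem pv_len10 (l : List Char) (h : l.length = 10) :
    ∃ a0 a1 a2 a3 a4 a5 a6 a7 a8 a9, l = [a0,a1,a2,a3,a4,a5,a6,a7,a8,a9] := by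
  rcases l with _|⟨a0,l⟩; · simp at h
  rcases l with _|⟨a1,l⟩; · simp at h
  rcases l with _|⟨a2,l⟩; · simp at h
  rcases l with _|⟨a3,l⟩; · simp at h
  rcases l with _|⟨a4,l⟩; · simp at h
  rcases l with _|⟨a5,l⟩; · simp at h
  rcases l with _|⟨a6,l⟩; · simp at h
  rcases l with _|⟨a7,l⟩; · simp at h
  rcases l with _|⟨a8,l⟩; · simp at h
  rcases l with _|⟨a9,l⟩; · simp at h
  rcases l with _|⟨a10,l⟩
  · exact ⟨a0,a1,a2,a3,a4,a5,a6,a7,a8,a9,rfl⟩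
  · simp only [List.length_cons] at h; omega

theorem pv_len13 (l : List Char) (h : l.length = 13) :
    ∃ a0 a1 a2 a3 a4 a5 a6 a7 a8 a9 a10 a11 a12,
      l = [a0,a1,a2,a3,a4,a5,a6,a7,a8,a9,a10,a11,a12] := by
  rcases l with _|⟨a0,l⟩; · simp at h
  rcases l with _|⟨a1,l⟩; · simp at h
  rcases l with _|⟨a2,l⟩; · simp at h
  rcases l with _|⟨a3,l⟩; · simp at h
  rcases l with _|⟨a4,l⟩; · simp at h
  rcases l with _|⟨a5,l⟩; · simp at h
  rcases l with _|⟨a6,l⟩; · simp at h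
  rcases l with _|⟨a7,l⟩; · simp at h
  rcases l with _|⟨a8,l⟩; · simp at h
  rcases l with _|⟨a9,l⟩; · simp at h
  rcases l with _|⟨a10,l⟩; · simp at h
  rcases l with _|⟨a11,l⟩; · simp at h
  rcases l with _|⟨a12,l⟩; · simp at h
  rcases l with _|⟨a13,l⟩
  · exact ⟨a0,a1,a2,a3,a4,a5,a6,a7,a8,a9,a10,a11,a12,rfl⟩
  · simp only [List.length_cons] at h; omega

-- ===== VERDICT (by name: the statement is the Claim_ definition above) =====
theorem check_vat_ec_spec : Claim_equal_check_vat_ec := by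
  intro vat _
  unfold Spec_check_vat_ec
  by_cases hdig : PySem.Chars.strIsdigit vat.toList
  case neg =>
    simp [check_vat_ec, check_vat_ec_alt, hdig]
  by_cases h99 : vat.toList = "9999999999999".toList
  · rw [String.toList_inj.mp h99]
    decide
  by_cases h10 : vat.toList.length = 10
  · obtain ⟨a0,a1,a2,a3,a4,a5,a6,a7,a8,a9,hl⟩ := pv_len10 _ h10
    exact pv_case10 vat a0 a1 a2 a3 a4 a5 a6 a7 a8 a9 hl (hl ▸ hdig)
  by_cases h13 : vat.toList.length = 13
  · obtain ⟨a0,a1,a2,a3,a4,a5,a6,a7,a8,a9,a10,a11,a12,hl⟩ := pv_len13 _ h13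
    exact pv_case13 vat a0 a1 a2 a3 a4 a5 a6 a7 a8 a9 a10 a11 a12 hl (hl ▸ hdig) h99
  · have h10' : ¬ vat.length = 10 := by simpa using h10
    have h13' : ¬ vat.length = 13 := by simpa using h13
    simp [check_vat_ec, check_vat_ec_alt, h10', h13']
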